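-- pv_equiv track=rewrite | github.com/wnstj-yang/Algorithm | Programmers/programmers_할인 행사.py | solution
-- ===== SOURCE A (Python) =====
-- from copy import deepcopy
--
-- def solution(want, number, discount):
--     answer = 0
--     need = {}  # 원하는 제품의 개수
--     # 각 개수에 맞게 딕셔너리로
--     for i in range(len(want)):
--         need[want[i]] = number[i]
--     # 각 인덱스마다 10개를 돌아야하기 때문에 전체 길이 - 10개 + 1 (인덱스 판단으로 1 추가)
--     for i in range(len(discount) - 10 + 1):
--         need_copy = deepcopy(need)  # 개수파악을 위해 복사
--         for j in range(10):
--             key = discount[i + j]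
--             # key가 있고 0보다 큰 경우라면 1을 줄이면서 개수 파악
--             if key in need_copy and need_copy[key] > 0:
--                 need_copy[key] -= 1
--         # 순회한 이후 값이 모두 0이면 전부 조건에 맞기 때문에 가능하다고 파악하여 1 증가
--         if sum(need_copy.values()) == 0:
--             answer += 1
--
--     return answer
-- ===== SOURCE B (Python) =====
-- def solution(want, number, discount):
--     # Key-major prefix-count scan: one prefix table per wanted product,
--     # windows checked by O(1) subtraction instead of copying and
--     # decrementing a dict for every window.
--     need = dict(zip(want, number))
--     ok = [True] * (len(discount) - 9)
--     for k, v in need.items():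
--         pre = [0]
--         for item in discount:
--             pre.append(pre[-1] + (1 if item == k else 0))
--         ok = [o and (pre[i + 10] - pre[i] >= v) for i, o in enumerate(ok)]
--     return sum(ok)
-- ===== Notes on version B (the rewrite author's own statement) =====
-- stated objective: alternative
-- what changed: Window-major dict copy-and-decrement (deepcopy need, decrement per item, test sum==0 per window) is replaced by a key-major prefix-count scan: one prefix-occurrence table per wanted product and each window checked by an O(1) subtraction, with a boolean per window ANDed across keys.
import Mathlib
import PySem

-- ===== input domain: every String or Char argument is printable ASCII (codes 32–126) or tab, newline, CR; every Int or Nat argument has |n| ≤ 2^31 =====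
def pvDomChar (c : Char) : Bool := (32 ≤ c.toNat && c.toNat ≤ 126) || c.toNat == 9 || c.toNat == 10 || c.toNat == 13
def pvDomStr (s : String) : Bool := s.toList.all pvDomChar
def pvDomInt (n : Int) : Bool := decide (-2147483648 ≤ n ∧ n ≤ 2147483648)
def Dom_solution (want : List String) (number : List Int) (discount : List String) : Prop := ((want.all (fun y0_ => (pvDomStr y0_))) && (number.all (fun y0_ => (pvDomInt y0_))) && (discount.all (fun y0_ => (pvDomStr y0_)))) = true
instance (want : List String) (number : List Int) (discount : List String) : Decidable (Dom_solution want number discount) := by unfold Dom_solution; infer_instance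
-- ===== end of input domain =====

-- B replaces A's per-window dict copy-and-decrement by a key-major prefix-count scan (alternative decomposition, same result).


-- ===== PORT A =====
def solution (want : List String) (number : List Int) (discount : List String) : Int :=
  let need : PySem.Dict String Int :=
    (PySem.List.pyRange 0 (PySem.List.len want) 1).foldl
      (fun d i => d.insert (PySem.List.pyGetD want i "") (PySem.List.pyGetD number i 0))
      PySem.Dict.empty
  (PySem.List.pyRange 0 (PySem.List.len discount - 10 + 1) 1).foldl
    (fun answer i =>
      let need_copy :=
        (PySem.List.pyRange 0 10 1).foldl
          (fun d j =>
            let key := PySem.List.pyGetD discount (i + j) ""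
            if d.contains key && decide (0 < d.getD key 0) then
              d.insert key (d.getD key 0 - 1)
            else d)
          need
      if need_copy.values.sum = 0 then answer + 1 else answer)
    0

-- ===== PORT B =====
def solution_alt (want : List String) (number : List Int) (discount : List String) : Int :=
  let need : PySem.Dict String Int :=
    (want.zip number).foldl (fun d p => d.insert p.1 p.2) PySem.Dict.empty
  let ok0 : List Bool := PySem.List.pyRepeat [true] (PySem.List.len discount - 9)
  let ok : List Bool :=
    need.items.foldl
      (fun ok kv =>
        let pre : List Int :=
          discount.foldl
            (fun pre item =>
              pre ++ [PySem.List.pyGetD pre (-1) 0 + (if item == kv.1 then 1 else 0)])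
            [0]
        (PySem.List.enumerate ok).map
          (fun p => p.2 && decide (kv.2 ≤ PySem.List.pyGetD pre (p.1 + 10) 0 - PySem.List.pyGetD pre p.1 0)))
      ok0
  ok.foldl (fun s b => s + (if b then 1 else 0)) 0

-- ===== PRECONDITION & SPEC =====
-- Pre_ excludes inputs where number is shorter than want (there A raises IndexError) and inputs where a
-- required count used for the dict is negative while a length-10 window exists: required counts are naturally
-- nonnegative, and on negative ones A's decrement-and-sum==0 test can accidentally accept a window by cancellation.
def Pre_solution (want : List String) (number : List Int) (discount : List String) : Prop :=
  want.length ≤ number.length ∧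
    (discount.length < 10 ∨ ∀ x ∈ number.take want.length, (0:Int) ≤ x)
instance (want : List String) (number : List Int) (discount : List String) : Decidable (Pre_solution want number discount) := by unfold Pre_solution; infer_instance

def pvWitness_solution : List String × List Int × List String :=
  (["a"], [1], ["a","b","a","a","a","a","a","a","a","a","b"])

def Spec_solution (want : List String) (number : List Int) (discount : List String) (out : Int) : Prop := out = solution_alt want number discount
instance (want : List String) (number : List Int) (discount : List String) (out : Int) : Decidable (Spec_solution want number discount out) := by unfold Spec_solution; infer_instance

-- ===== CLAIM (what is proved, stated in full; the proofs are below) =====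
def Claim_equal_solution : Prop := ∀ (want : List String) (number : List Int) (discount : List String), Dom_solution want number discount → Pre_solution want number discount → Spec_solution want number discount (solution want number discount)

-- ===== LEMMAS AND PROOFS =====

-- A's per-window decrement step (the body of A's inner `for j in range(10)` loop, key already fetched)
def decStep (d : PySem.Dict String Int) (key : String) : PySem.Dict String Int :=
  if d.contains key && decide (0 < d.getD key 0) then d.insert key (d.getD key 0 - 1) else d

-- L1: building the dict by A's index loop equals building it from zip (B), given enough numbers
theorem zipfold (w : List String) : ∀ (num : List Int) (d : PySem.Dict String Int),
    w.length ≤ num.length →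
    (List.range w.length).foldl (fun d k => d.insert (w.getD k "") (num.getD k 0)) d
      = (w.zip num).foldl (fun d p => d.insert p.1 p.2) d := by
  induction w with
  | nil => intro num d _; simp
  | cons x w ih =>
    intro num d h
    cases num with
    | nil => simp at h
    | cons y num =>
      rw [List.length_cons, List.range_succ_eq_map, List.foldl_cons, List.foldl_map]
      simp only [List.getD_cons_zero, List.getD_cons_succ, List.zip_cons_cons, List.foldl_cons,
        Nat.succ_eq_add_one]
      exact ih num _ (by simpa using h)

-- the second component of a zip entry comes from the truncated second list
theorem zip_snd_mem_take : ∀ (w : List String) (num : List Int) (k : String) (v : Int),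
    (k, v) ∈ w.zip num → v ∈ num.take w.length := by
  intro w
  induction w with
  | nil => intro num k v h; simp at h
  | cons x w ih =>
    intro num k v h
    cases num with
    | nil => simp at h
    | cons y num =>
      rw [List.zip_cons_cons, List.mem_cons] at h
      rw [List.length_cons, List.take_succ_cons, List.mem_cons]
      rcases h with h | h
      · left; exact congrArg Prod.snd h
      · right; exact ih num k v h

-- L2: any binding of a dict built by inserting pairs comes from the pairs (or the start dict)
theorem get?_foldl_insert_mem (l : List (String × Int)) : ∀ (d : PySem.Dict String Int) (k : String) (v : Int),
    ((l.foldl (fun d p => d.insert p.1 p.2) d).get? k = some v) → (k, v) ∈ l ∨ d.get? k = some v := by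
  induction l with
  | nil => intro d k v h; right; simpa using h
  | cons p l ih =>
    intro d k v h
    rw [List.foldl_cons] at h
    rcases ih _ _ _ h with h1 | h2
    · exact Or.inl (List.mem_cons_of_mem _ h1)
    · rw [PySem.Dict.get?_insert] at h2
      split at h2
      · rename_i heq
        injection h2 with h3
        left
        subst heq h3
        simp
      · exact Or.inr h2

-- L4: an index loop over a window of xs is a fold over the window
theorem rangefold_window {γ : Type} (g : γ → String → γ) (xs : List String) :
    ∀ (n m : Nat) (acc : γ), m + n ≤ xs.length →
    (List.range n).foldl (fun acc k => g acc (xs.getD (m+k) "")) acc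
      = ((xs.drop m).take n).foldl g acc := by
  intro n
  induction n with
  | zero => intro m acc _; simp
  | succ n ih =>
    intro m acc h
    have hm : m < xs.length := by omega
    rw [List.range_succ_eq_map, List.foldl_cons, List.foldl_map,
        List.drop_eq_getElem_cons hm, List.take_succ_cons, List.foldl_cons]
    have hb : (fun (acc : γ) (k : Nat) => g acc (xs.getD (m + Nat.succ k) "")) =
              (fun acc k => g acc (xs.getD ((m+1) + k) "")) := by
      funext acc k
      have hmk : m + Nat.succ k = (m+1) + k := by omega
      rw [hmk]
    have h0 : xs.getD (m + 0) "" = xs[m] := by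
      rw [Nat.add_zero]; exact List.getD_eq_getElem xs "" hm
    rw [h0, hb]
    exact ih (m+1) _ (by omega)

-- L5: A's decrement loop, pointwise: each value drops by the window count, floored at 0
theorem decAll_get? (w : List String) : ∀ (d : PySem.Dict String Int),
    (∀ k v, d.get? k = some v → 0 ≤ v) → ∀ k,
    ((w.foldl decStep d).get? k) = (d.get? k).map (fun v => max (v - (w.count k : Int)) 0) := by
  induction w with
  | nil =>
    intro d hd k
    simp only [List.foldl_nil, List.count_nil, Nat.cast_zero, sub_zero]
    cases h : d.get? k with
    | none => simp
    | some v => simp [max_eq_left (hd k v h)]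
  | cons x w ih =>
    intro d hd k
    rw [List.foldl_cons]
    have hstep : ∀ k' v', (decStep d x).get? k' = some v' → 0 ≤ v' := by
      intro k' v' h'
      unfold decStep at h'
      split at h'
      · rw [PySem.Dict.get?_insert] at h'
        split at h'
        · rename_i hcond _
          injection h' with h''
          have h0 : 0 < d.getD x 0 := of_decide_eq_true ((Bool.and_eq_true _ _).mp hcond).2
          omega
        · exact hd _ _ h'
      · exact hd _ _ h'
    rw [ih _ hstep k]
    by_cases hkx : k = x
    · subst hkx
      unfold decStep
      cases h : d.get? k with
      | none =>
        have hc : d.contains k = false := by rw [PySem.Dict.contains_eq_isSome_get?, h]; rfl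
        simp [hc, h]
      | some v =>
        have hc : d.contains k = true := by rw [PySem.Dict.contains_eq_isSome_get?, h]; rfl
        have hg : d.getD k 0 = v := by rw [PySem.Dict.getD_eq_get?_getD, h]; rfl
        have hcnt : (List.count k (k :: w) : Int) = (List.count k w : Int) + 1 := by
          rw [List.count_cons_self]; push_cast; ring
        have hcw := Int.natCast_nonneg (List.count k w)
        by_cases hv : 0 < v
        · simp only [hc, hg, hv, decide_true, Bool.and_self, if_true]
          rw [PySem.Dict.get?_insert, if_pos rfl]
          simp only [Option.map_some, Option.some.injEq]
          rw [hcnt]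
          congr 1
          ring
        · have hv0 : v = 0 := le_antisymm (by omega) (hd _ _ h)
          have hdec : decide (0 < d.getD k 0) = false := by rw [hg, hv0]; simp
          simp only [hdec, Bool.and_false, Bool.false_eq_true, if_false]
          rw [h]
          simp only [Option.map_some, Option.some.injEq, hcnt, hv0]
          rw [max_eq_right (by omega), max_eq_right (by omega)]
    · have hget : (decStep d x).get? k = d.get? k := by
        unfold decStep
        split
        · rw [PySem.Dict.get?_insert, if_neg hkx]
        · rfl
      rw [hget]
      have hxk : (x == k) = false := by simp [Ne.symm hkx]
      have : List.count k (x :: w) = List.count k w := by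
        rw [List.count_cons, hxk]; simp
      rw [this]

-- L6: the decrement loop never changes the key list
theorem decAll_keys (w : List String) : ∀ (d : PySem.Dict String Int),
    (w.foldl decStep d).keys = d.keys := by
  induction w with
  | nil => intro d; rfl
  | cons x w ih =>
    intro d
    rw [List.foldl_cons, ih]
    unfold decStep
    split
    · rename_i h
      exact PySem.Dict.keys_insert_of_contains d _ ((Bool.and_eq_true _ _).mp h).1
    · rfl

-- a sum of nonnegative integers is zero iff all summands are zero
theorem sum_eq_zero_iff_int : ∀ (l : List Int), (∀ x ∈ l, 0 ≤ x) → (l.sum = 0 ↔ ∀ x ∈ l, x = 0) := by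
  intro l
  induction l with
  | nil => intro _; simp
  | cons a l ih =>
    intro h
    have ha := h a (List.mem_cons_self ..)
    have ht : ∀ x ∈ l, (0:Int) ≤ x := fun x hx => h x (List.mem_cons_of_mem _ hx)
    have hs : 0 ≤ l.sum := List.sum_nonneg ht
    rw [List.sum_cons]
    constructor
    · intro he
      have h1 : a = 0 ∧ l.sum = 0 := by omega
      intro x hx
      rcases List.mem_cons.mp hx with rfl | hx'
      · exact h1.1
      · exact ((ih ht).mp h1.2) x hx'
    · intro hall
      rw [hall a (List.mem_cons_self ..), ((ih ht).mpr (fun x hx => hall x (List.mem_cons_of_mem _ hx)))]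
      simp

-- L7: A's window test, characterised: the decremented values sum to zero iff every wanted count is covered
theorem decAll_sum_zero (w : List String) (d : PySem.Dict String Int)
    (hnd : d.keys.Nodup) (hnn : ∀ k v, d.get? k = some v → 0 ≤ v) :
    ((w.foldl decStep d).values).sum = 0 ↔ ∀ k ∈ d.keys, d.getD k 0 ≤ (w.count k : Int) := by
  have hk : (w.foldl decStep d).keys = d.keys := decAll_keys w d
  have hnd' : (w.foldl decStep d).keys.Nodup := by rw [hk]; exact hnd
  rw [PySem.Dict.values_eq_map_keys _ hnd' 0, hk]
  have hval : ∀ k ∈ d.keys, (w.foldl decStep d).getD k 0 = max (d.getD k 0 - (w.count k : Int)) 0 := by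
    intro k hkmem
    have hc : d.contains k = true := (PySem.Dict.contains_iff_mem_keys d k).mpr hkmem
    rw [PySem.Dict.contains_eq_isSome_get?] at hc
    obtain ⟨v, hv⟩ := Option.isSome_iff_exists.mp hc
    rw [PySem.Dict.getD_eq_get?_getD, decAll_get? w d hnn k, hv,
        PySem.Dict.getD_eq_get?_getD, hv]
    rfl
  rw [List.map_congr_left hval]
  rw [sum_eq_zero_iff_int _ (by
    intro x hx
    obtain ⟨k, hk', rfl⟩ := List.mem_map.mp hx
    exact le_max_right _ _)]
  constructor
  · intro hall k hkm
    have hmax := hall _ (List.mem_map_of_mem hkm)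
    have := max_eq_right_iff.mp hmax
    omega
  · intro hall x hx
    obtain ⟨k, hkm, rfl⟩ := List.mem_map.mp hx
    exact max_eq_right (by have := hall k hkm; omega)

-- L9: B's prefix list, characterised: entry i is the count of k among the first i discounts
theorem preChar (k : String) (xs : List String) :
    xs.foldl (fun pre item => pre ++ [PySem.List.pyGetD pre (-1) 0 + (if item == k then 1 else 0)]) [0]
      = (List.range (xs.length+1)).map (fun i => (((xs.take i).count k : Nat) : Int)) := by
  induction xs using List.reverseRecOn with
  | nil => simp
  | append_singleton xs x ih =>
    rw [List.foldl_append, List.foldl_cons, List.foldl_nil, ih]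
    have hM : (List.range (xs.length+1)).map (fun i => (((xs.take i).count k : Nat) : Int))
        = (List.range xs.length).map (fun i => (((xs.take i).count k : Nat) : Int))
          ++ [((xs.count k : Nat) : Int)] := by
      rw [List.range_succ, List.map_append]
      simp [List.take_length]
    rw [hM, PySem.List.pyGetD_neg_one_append_singleton]
    rw [show (xs ++ [x]).length = xs.length + 1 from by simp]
    rw [List.range_succ, List.map_append, ← hM]
    congr 1
    · apply List.map_congr_left
      intro i hi
      have hile : i ≤ xs.length := by
        have := List.mem_range.mp hi; omega
      rw [List.take_append_of_le_length hile]
    · have htake : (xs ++ [x]).take (xs.length + 1) = xs ++ [x] := by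
        apply List.take_of_length_le; simp
      simp only [List.map_cons, List.map_nil, htake, List.count_append]
      have hsing : List.count k [x] = if (x == k) = true then 1 else 0 := by
        simp [List.count_cons]
      rw [hsing]
      push_cast
      split <;> simp

-- L11: B's fold over the wanted items updates the ok list pointwise
theorem okfold_getD (cond : String × Int → Int → Bool) (c : String × Int → Nat → Bool)
    (m : Nat) (hc : ∀ kv (j : Nat), j < m → cond kv (j : Int) = c kv j)
    (l : List (String × Int)) : ∀ (ok : List Bool), ok.length = m →
    ((l.foldl (fun ok kv => (PySem.List.enumerate ok).map (fun p => p.2 && cond kv p.1)) ok).length = m) ∧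
    (∀ j : Nat, j < m →
      (l.foldl (fun ok kv => (PySem.List.enumerate ok).map (fun p => p.2 && cond kv p.1)) ok).getD j false
        = (ok.getD j false && l.all (fun kv => c kv j))) := by
  induction l with
  | nil =>
    intro ok hlen
    refine ⟨hlen, ?_⟩
    intro j hj
    simp
  | cons kv l ih =>
    intro ok hlen
    rw [List.foldl_cons]
    have hstep : (PySem.List.enumerate ok).map (fun p => p.2 && cond kv p.1)
        = (List.range m).map (fun j => ok.getD j false && cond kv (j : Int)) := by
      rw [PySem.List.enumerate_eq_map_pyRange ok false, List.map_map,
          PySem.List.len_eq, PySem.List.pyRange_one, List.map_map]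
      simp only [sub_zero, Int.toNat_natCast, Function.comp_def, zero_add,
        PySem.List.pyGetD_natCast]
      rw [hlen]
    rw [hstep]
    have hlen2 : ((List.range m).map (fun j => ok.getD j false && cond kv (j:Int))).length = m := by
      simp
    obtain ⟨ih1, ih2⟩ := ih _ hlen2
    refine ⟨ih1, ?_⟩
    intro j hj
    rw [ih2 j hj, PySem.List.getD_map_range _ _ _ _ hj, hc kv j hj, List.all_cons, Bool.and_assoc]

-- A's inner 10-step loop over window j is a fold of decStep over the window slice
theorem windowfold (discount : List String) (dd : PySem.Dict String Int) (j : Nat)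
    (h : j + 10 ≤ discount.length) :
    (PySem.List.pyRange 0 10 1).foldl
      (fun d jj =>
        if d.contains (PySem.List.pyGetD discount ((j:Int) + jj) "") &&
            decide (0 < d.getD (PySem.List.pyGetD discount ((j:Int) + jj) "") 0) then
          d.insert (PySem.List.pyGetD discount ((j:Int) + jj) "")
            (d.getD (PySem.List.pyGetD discount ((j:Int) + jj) "") 0 - 1)
        else d) dd
      = ((discount.drop j).take 10).foldl decStep dd := by
  have hr : PySem.List.pyRange 0 10 1 = (List.range 10).map (fun k => ((k : Nat) : Int)) := by
    rw [PySem.List.pyRange_one 0 10]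
    rw [show ((10:Int) - 0).toNat = 10 from by decide]
    exact List.map_congr_left (fun k _ => by omega)
  rw [hr, List.foldl_map]
  have hb : (fun (d : PySem.Dict String Int) (k : Nat) =>
      if d.contains (PySem.List.pyGetD discount ((j:Int) + (k:Int)) "") &&
          decide (0 < d.getD (PySem.List.pyGetD discount ((j:Int) + (k:Int)) "") 0) then
        d.insert (PySem.List.pyGetD discount ((j:Int) + (k:Int)) "")
          (d.getD (PySem.List.pyGetD discount ((j:Int) + (k:Int)) "") 0 - 1)
      else d)
      = (fun d k => decStep d (discount.getD (j + k) "")) := by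
    funext d k
    have hidx : ((j:Int) + (k:Int)) = (((j + k : Nat) : Nat) : Int) := by push_cast; ring
    rw [hidx, PySem.List.pyGetD_natCast]
    rfl
  rw [hb]
  exact rangefold_window decStep discount 10 j dd (by omega)

-- sum(list of bools) is the count of trues
theorem foldl_bool_sum (L : List Bool) :
    L.foldl (fun s b => s + (if b then (1:Int) else 0)) 0 = ((L.countP (fun b => b) : Nat) : Int) := by
  rw [PySem.List.foldl_add L (fun b => if b then (1:Int) else 0) 0, zero_add]
  exact PySem.List.sum_map_ite_one_zero (fun b => b) L

-- ===== VERDICT (by name: the statement is the Claim_ definition above) =====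
set_option maxHeartbeats 2000000 in
theorem solution_spec : Claim_equal_solution := by
  intro want number discount _hdom hpre
  obtain ⟨hlen, hdisj⟩ := hpre
  unfold Spec_solution solution solution_alt
  simp only []
  -- the two need dicts coincide
  have hneed : (PySem.List.pyRange 0 (PySem.List.len want) 1).foldl
      (fun d i => d.insert (PySem.List.pyGetD want i "") (PySem.List.pyGetD number i 0)) PySem.Dict.empty
      = (want.zip number).foldl (fun d p => d.insert p.1 p.2) PySem.Dict.empty := by
    rw [PySem.List.len_eq, PySem.List.pyRange_one, List.foldl_map]
    simp only [sub_zero, Int.toNat_natCast, zero_add, PySem.List.pyGetD_natCast]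
    exact zipfold want number _ hlen
  rw [hneed]
  set need : PySem.Dict String Int := (want.zip number).foldl (fun d p => d.insert p.1 p.2) PySem.Dict.empty with hneed_def
  have hknd : need.keys.Nodup :=
    PySem.Dict.nodup_keys_foldl_insert_key (want.zip number) Prod.fst (fun _ p => p.2)
      PySem.Dict.empty PySem.Dict.nodup_keys_empty
  set m : Nat := discount.length - 9 with hm_def
  -- the window predicate both sides compute
  set c : String × Int → Nat → Bool :=
    fun kv j => decide (kv.2 ≤ ((((discount.drop j).take 10).count kv.1 : Nat) : Int)) with hc_def
  -- ===== B side =====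
  have hok0 : PySem.List.pyRepeat [true] (PySem.List.len discount - 9) = List.replicate m true := by
    rw [PySem.List.len_eq, PySem.List.pyRepeat_singleton]
    congr 1
    omega
  rw [hok0]
  have hc : ∀ (kv : String × Int) (j : Nat), j < m →
      (decide (kv.2 ≤ PySem.List.pyGetD
          (discount.foldl (fun pre item => pre ++ [PySem.List.pyGetD pre (-1) 0 + (if item == kv.1 then 1 else 0)]) [0])
          ((j:Int) + 10) 0
        - PySem.List.pyGetD
          (discount.foldl (fun pre item => pre ++ [PySem.List.pyGetD pre (-1) 0 + (if item == kv.1 then 1 else 0)]) [0])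
          (j:Int) 0)) = c kv j := by
    intro kv j hj
    have hj10 : j + 10 ≤ discount.length := by omega
    rw [preChar kv.1 discount]
    have hcast : ((j:Int) + 10) = (((j+10 : Nat) : Nat) : Int) := by push_cast; ring
    rw [hcast, PySem.List.pyGetD_natCast, PySem.List.pyGetD_natCast,
        PySem.List.getD_map_range _ _ _ _ (by omega : j + 10 < discount.length + 1),
        PySem.List.getD_map_range _ _ _ _ (by omega : j < discount.length + 1)]
    rw [hc_def]
    rw [decide_eq_decide]
    rw [List.take_add, List.count_append]
    push_cast
    omega
  obtain ⟨hBlen, hBgetD⟩ :=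
    okfold_getD
      (fun kv i => decide (kv.2 ≤ PySem.List.pyGetD
          (discount.foldl (fun pre item => pre ++ [PySem.List.pyGetD pre (-1) 0 + (if item == kv.1 then 1 else 0)]) [0])
          (i + 10) 0
        - PySem.List.pyGetD
          (discount.foldl (fun pre item => pre ++ [PySem.List.pyGetD pre (-1) 0 + (if item == kv.1 then 1 else 0)]) [0])
          i 0))
      c m hc need.items (List.replicate m true) (by simp)
  have hBok : (need.items.foldl
      (fun ok kv => (PySem.List.enumerate ok).map
        (fun p => p.2 && decide (kv.2 ≤ PySem.List.pyGetD
            (discount.foldl (fun pre item => pre ++ [PySem.List.pyGetD pre (-1) 0 + (if item == kv.1 then 1 else 0)]) [0])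
            (p.1 + 10) 0
          - PySem.List.pyGetD
            (discount.foldl (fun pre item => pre ++ [PySem.List.pyGetD pre (-1) 0 + (if item == kv.1 then 1 else 0)]) [0])
            p.1 0)))
      (List.replicate m true))
      = (List.range m).map (fun j => need.items.all (fun kv => c kv j)) := by
    apply List.ext_getElem (by simp only [hBlen, List.length_map, List.length_range])
    intro i h1 h2
    have him : i < m := by rw [hBlen] at h1; exact h1
    rw [← List.getD_eq_getElem _ false h1, ← List.getD_eq_getElem _ false h2,
        hBgetD i him, PySem.List.getD_map_range _ _ _ _ him]
    have hrep : (List.replicate m true).getD i false = true := by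
      rw [List.getD_eq_getElem _ false (by simpa using him)]
      simp
    rw [hrep, Bool.true_and]
  rw [hBok, foldl_bool_sum, List.countP_map]
  -- ===== A side =====
  rw [show PySem.List.len discount - 10 + 1 = (discount.length : Int) - 9 from by
    rw [PySem.List.len_eq]; ring]
  rw [PySem.List.foldl_ite_add_one
    (fun i => ((PySem.List.pyRange 0 10 1).foldl
      (fun d j => if d.contains (PySem.List.pyGetD discount (i + j) "") &&
          decide (0 < d.getD (PySem.List.pyGetD discount (i + j) "") 0) then
          d.insert (PySem.List.pyGetD discount (i + j) "")
            (d.getD (PySem.List.pyGetD discount (i + j) "") 0 - 1)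
        else d) need).values.sum = 0)]
  rw [zero_add, PySem.List.pyRange_one 0 ((discount.length : Int) - 9)]
  rw [show (((discount.length : Int) - 9 - 0).toNat) = m from by omega]
  rw [List.countP_map]
  refine congrArg (fun n : Nat => (n : Int)) ?_
  apply List.countP_congr
  intro j hjm
  have hj : j < m := List.mem_range.mp hjm
  have hnn : ∀ x ∈ number.take want.length, (0:Int) ≤ x := hdisj.resolve_left (by omega)
  have hneednn : ∀ k v, need.get? k = some v → 0 ≤ v := by
    intro k v h
    rcases get?_foldl_insert_mem _ _ _ _ h with hm | he
    · exact hnn v (zip_snd_mem_take want number k v hm)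
    · rw [PySem.Dict.get?_empty] at he; cases he
  simp only [Function.comp_def, zero_add]
  rw [decide_eq_true_eq]
  -- reduce A's inner loop to a fold of decStep over the window
  rw [windowfold discount need j (by omega)]
  rw [decAll_sum_zero _ _ hknd hneednn]
  rw [PySem.Dict.items_eq_map_keys need hknd 0, List.all_map, List.all_eq_true]
  constructor
  · intro hkeys k hkm
    simp only [Function.comp_def, hc_def]
    exact decide_eq_true (hkeys k hkm)
  · intro hall k hkm
    have := hall k hkm
    simp only [Function.comp_def, hc_def] at this
    exact of_decide_eq_true this
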